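-- pv_equiv track=rewrite | github.com/rob-9/search-engine-spec | search.py | min_window_span
-- ===== SOURCE A (Python) =====
-- def min_window_span(pos_lists: list[list[int]]) -> int:
--     """find minimum window span containing at least one position from each list."""
--     if not pos_lists or any(not pl for pl in pos_lists):
--         return -1
--
--     pointers = [0] * len(pos_lists)
--     min_span = float('inf')
--
--     while True:
--         positions = [pos_lists[i][pointers[i]] for i in range(len(pos_lists))]
--         span = max(positions) - min(positions)
--         min_span = min(min_span, span)
--         if min_span == 0:
--             return 0
--         min_idx = 0
--         min_val = positions[0]
--         for i in range(1, len(positions)):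
--             if positions[i] < min_val:
--                 min_val = positions[i]
--                 min_idx = i
--         pointers[min_idx] += 1
--         if pointers[min_idx] >= len(pos_lists[min_idx]):
--             break
--
--     return min_span if min_span != float('inf') else -1
-- ===== SOURCE B (Python) =====
-- from bisect import insort
--
--
-- def min_window_span(pos_lists: list[list[int]]) -> int:
--     """find minimum window span containing at least one position from each list."""
--     if not pos_lists or any(not pl for pl in pos_lists):
--         return -1
--     frontier = []  # sorted list of (value, list index, element index)
--     for i, pl in enumerate(pos_lists):
--         insort(frontier, (pl[0], i, 0))
--     best = None
--     while True:
--         lo, i, j = frontier[0]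
--         span = frontier[-1][0] - lo
--         if best is None or span < best:
--             best = span
--         if best == 0:
--             return 0
--         j += 1
--         if j >= len(pos_lists[i]):
--             return best
--         frontier.pop(0)
--         insort(frontier, (pos_lists[i][j], i, j))
-- ===== Notes on version B (the rewrite author's own statement) =====
-- stated objective: faster
-- what changed: B keeps the current window frontier in a bisect-maintained sorted list of (value, list index, element index) triples, so A's four interpreted per-step scans (positions list build, max, min, first-argmin loop) disappear: the minimum is the frontier's head, the maximum its last element, and each step pops the head and insorts the next element of that list.
import Mathlib
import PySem

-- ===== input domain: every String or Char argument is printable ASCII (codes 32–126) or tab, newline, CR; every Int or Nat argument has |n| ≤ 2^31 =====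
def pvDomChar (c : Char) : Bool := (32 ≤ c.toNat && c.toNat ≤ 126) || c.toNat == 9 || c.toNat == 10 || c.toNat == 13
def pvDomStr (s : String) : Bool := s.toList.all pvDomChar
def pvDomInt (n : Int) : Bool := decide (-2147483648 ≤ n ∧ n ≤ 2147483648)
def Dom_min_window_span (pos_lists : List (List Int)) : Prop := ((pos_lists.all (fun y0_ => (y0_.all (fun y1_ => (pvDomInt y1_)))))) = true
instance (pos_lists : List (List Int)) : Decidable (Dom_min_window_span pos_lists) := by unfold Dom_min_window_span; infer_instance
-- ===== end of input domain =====

-- B replaces A's per-step scans (positions list, max, min, first-argmin loop) by a frontier kept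
-- as a bisect-sorted list of (value, list index, element index) triples: the current minimum is its
-- head and the current maximum its last element (objective: faster by a constant factor, as the
-- timing run measured; same O(N*k) worst case).

-- ===== PORT A =====
-- fuel for the `while True` loop: it advances one pointer per iteration, so the total number of
-- iterations is bounded by the total number of positions; the fuel only makes the loop total and
-- is never exhausted on the guarded inputs.
def pvFuel (pos_lists : List (List Int)) : Nat := (pos_lists.map List.length).sum + 1

-- the loop body of A; pointers are the Python `pointers` list (all values nonnegative, so Nat is
-- exact), minSpan `none` models float('inf').  All list indexings are in range on every reachable
-- state (pointers[i] < len(pos_lists[i]) is kept as a loop invariant by the break), so `getD` is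
-- exact where Python indexes.
def pvALoop (pls : List (List Int)) : Nat → List Nat → Option Int → Int
  | 0, _, minSpan => minSpan.getD (-1)
  | fuel+1, ptrs, minSpan =>
    -- positions = [pos_lists[i][pointers[i]] for i in range(len(pos_lists))]
    let positions := (List.range pls.length).map (fun i => ((pls.getD i []).getD (ptrs.getD i 0) 0))
    -- span = max(positions) - min(positions)
    let span := ((PySem.List.max? positions (fun x => x)).getD 0) - ((PySem.List.min? positions (fun x => x)).getD 0)
    -- min_span = min(min_span, span)
    let minSpan' := match minSpan with | none => span | some m => min m span
    if minSpan' = 0 then 0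
    else
      -- the first-argmin scan over range(1, len(positions)) (indices are Nats, exact here)
      let mm := (List.range' 1 (positions.length - 1)).foldl
          (fun (p : Int × Nat) i => if positions.getD i 0 < p.1 then (positions.getD i 0, i) else p)
          (positions.getD 0 0, 0)
      -- pointers[min_idx] += 1;  if pointers[min_idx] >= len(pos_lists[min_idx]): break
      let ptrs' := ptrs.set mm.2 (ptrs.getD mm.2 0 + 1)
      if (pls.getD mm.2 []).length ≤ ptrs.getD mm.2 0 + 1 then minSpan'
      else pvALoop pls fuel ptrs' minSpan'

def min_window_span (pos_lists : List (List Int)) : Int :=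
  if pos_lists = [] ∨ pos_lists.any (fun pl => pl = []) then -1
  else pvALoop pos_lists (pvFuel pos_lists) (List.replicate pos_lists.length 0) none

-- ===== PORT B =====
-- Python tuple comparison (value, list index, element index), strict lexicographic <
def pvTupLt (a b : Int × Nat × Nat) : Bool :=
  a.1 < b.1 || (a.1 == b.1 && (a.2.1 < b.2.1 || (a.2.1 == b.2.1 && a.2.2 < b.2.2)))

-- bisect.insort: insert x into the sorted list, after entries equal to x
def pvInsort (x : Int × Nat × Nat) : List (Int × Nat × Nat) → List (Int × Nat × Nat)
  | [] => [x]
  | y :: ys => if pvTupLt x y then x :: y :: ys else y :: pvInsort x ys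

-- the while-loop of B; `best` none models Python's initial None; same fuel remark as for A.
def pvBLoop (pls : List (List Int)) : Nat → List (Int × Nat × Nat) → Option Int → Int
  | 0, _, best => best.getD (-1)
  | fuel+1, frontier, best =>
    match frontier with
    | [] => best.getD (-1)  -- unreachable: the frontier always holds one triple per list
    | f :: rest =>
      -- lo, i, j = frontier[0]; span = frontier[-1][0] - lo
      let span := (((f :: rest).getLast (List.cons_ne_nil f rest)).1) - f.1
      let best' := match best with | none => span | some b => if span < b then span else b
      if best' = 0 then 0
      else
        let j' := f.2.2 + 1
        if (pls.getD f.2.1 []).length ≤ j' then best'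
        else pvBLoop pls fuel (pvInsort ((pls.getD f.2.1 []).getD j' 0, f.2.1, j') rest) (some best')

def min_window_span_alt (pos_lists : List (List Int)) : Int :=
  if pos_lists = [] ∨ pos_lists.any (fun pl => pl = []) then -1
  else
    let frontier := pos_lists.zipIdx.foldl (fun f p => pvInsort (p.1.getD 0 0, p.2, 0) f) []
    pvBLoop pos_lists (pvFuel pos_lists) frontier none

-- ===== PRECONDITION & SPEC =====
def Spec_min_window_span (pos_lists : List (List Int)) (out : Int) : Prop := out = min_window_span_alt pos_lists
instance (pos_lists : List (List Int)) (out : Int) : Decidable (Spec_min_window_span pos_lists out) := by unfold Spec_min_window_span; infer_instance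

-- ===== CLAIM (what is proved, stated in full; the proofs are below) =====
def Claim_equal_min_window_span : Prop := ∀ (pos_lists : List (List Int)), Dom_min_window_span pos_lists → Spec_min_window_span pos_lists (min_window_span pos_lists)

-- ===== LEMMAS AND PROOFS =====

-- the multiset of triples the frontier must hold when A's pointer list is ptrs
def pvCanon (pls : List (List Int)) (ptrs : List Nat) : List (Int × Nat × Nat) :=
  (List.range pls.length).map (fun i => ((pls.getD i []).getD (ptrs.getD i 0) 0, i, ptrs.getD i 0))

def pvLexLt (a b : Int × Nat × Nat) : Prop := pvTupLt a b = true

theorem pvTupLt_iff (a b : Int × Nat × Nat) :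
    pvTupLt a b = true ↔ (a.1 < b.1 ∨ (a.1 = b.1 ∧ (a.2.1 < b.2.1 ∨ (a.2.1 = b.2.1 ∧ a.2.2 < b.2.2)))) := by
  simp [pvTupLt]

theorem pvTupLt_total_of_ne_mid (a b : Int × Nat × Nat) (h : a.2.1 ≠ b.2.1) :
    pvTupLt a b = true ∨ pvTupLt b a = true := by
  simp only [pvTupLt_iff]
  omega

theorem pvInsort_perm (x : Int × Nat × Nat) (l : List (Int × Nat × Nat)) :
    (pvInsort x l).Perm (x :: l) := by
  induction l with
  | nil => simp [pvInsort]
  | cons y ys ih =>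
    by_cases h : pvTupLt x y
    · simp [pvInsort, h]
    · simp only [pvInsort, h, Bool.false_eq_true, if_false]
      exact ((ih.cons y).trans (List.Perm.swap x y ys)).symm.symm

theorem pvInsort_pairwise (x : Int × Nat × Nat) (l : List (Int × Nat × Nat))
    (hl : l.Pairwise pvLexLt) (hx : ∀ y ∈ l, y.2.1 ≠ x.2.1) :
    (pvInsort x l).Pairwise pvLexLt := by
  induction l with
  | nil => simp [pvInsort]
  | cons y ys ih =>
    rcases List.pairwise_cons.mp hl with ⟨hy, hys⟩
    by_cases h : pvTupLt x y
    · simp only [pvInsort, h, if_true]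
      refine List.pairwise_cons.mpr ⟨?_, hl⟩
      intro z hz
      rcases List.mem_cons.mp hz with rfl | hz
      · exact h
      · -- x < y ≤ z
        have hyz := hy z hz
        unfold pvLexLt at *
        simp only [pvTupLt_iff] at h hyz ⊢
        omega
    · simp only [pvInsort, h, Bool.false_eq_true, if_false]
      refine List.pairwise_cons.mpr ⟨?_, ih hys (fun z hz => hx z (by simp [hz]))⟩
      intro z hz
      have hz' : z = x ∨ z ∈ ys := by
        have := (pvInsort_perm x ys).mem_iff.mp hz
        simpa using this
      rcases hz' with rfl | hz'
      · -- y before z = x: ¬ x < y and middle components differ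
        have hne := hx y (by simp)
        rcases pvTupLt_total_of_ne_mid z y (by omega) with h1 | h2
        · exact absurd h1 h
        · exact h2
      · exact hy z hz'

-- basic facts about pvCanon
theorem pvCanon_length (pls : List (List Int)) (ptrs : List Nat) :
    (pvCanon pls ptrs).length = pls.length := by simp [pvCanon]

theorem pvCanon_getElem (pls : List (List Int)) (ptrs : List Nat) (k : Nat) (hk : k < pls.length) :
    (pvCanon pls ptrs)[k]'(by simp [pvCanon_length, hk]) =
      ((pls.getD k []).getD (ptrs.getD k 0) 0, k, ptrs.getD k 0) := by
  simp [pvCanon]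

theorem pvCanon_map_mid (pls : List (List Int)) (ptrs : List Nat) :
    (pvCanon pls ptrs).map (fun t => t.2.1) = List.range pls.length := by
  simp [pvCanon, List.map_map, Function.comp_def]

theorem pvArgmin_aux (ps : List Int) (m : Nat) :
    let r := (List.range' 1 m).foldl
      (fun (p : Int × Nat) i => if ps.getD i 0 < p.1 then (ps.getD i 0, i) else p)
      (ps.getD 0 0, 0)
    r.2 ≤ m ∧ ps.getD r.2 0 = r.1 ∧ (∀ k, k ≤ m → r.1 ≤ ps.getD k 0) ∧
      (∀ k, k < r.2 → r.1 < ps.getD k 0) := by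
  induction m with
  | zero =>
    simp only [List.range'_zero, List.foldl_nil]
    refine ⟨le_refl _, by trivial, ?_, by omega⟩
    intro k hk
    have : k = 0 := Nat.le_zero.mp hk
    subst this
    exact le_refl _
  | succ m ih =>
    simp only [List.range'_1_concat, List.foldl_append, List.foldl_cons, List.foldl_nil] at *
    set r := (List.range' 1 m).foldl
      (fun (p : Int × Nat) i => if ps.getD i 0 < p.1 then (ps.getD i 0, i) else p)
      (ps.getD 0 0, 0) with hr
    obtain ⟨h1, h2, h3, h4⟩ := ih
    by_cases hc : ps.getD (1+m) 0 < r.1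
    · simp only [hc, if_pos]
      refine ⟨by omega, by trivial, ?_, ?_⟩
      · intro k hk
        rcases Nat.lt_or_ge k (m+1) with h | h
        · have := h3 k (by omega); omega
        · have : k = 1 + m := by omega
          subst this; omega
      · intro k hk
        have := h3 k (by omega); omega
    · simp only [hc, if_false]
      refine ⟨by omega, h2, ?_, h4⟩
      intro k hk
      rcases Nat.lt_or_ge k (m+1) with h | h
      · exact h3 k (by omega)
      · have : k = 1 + m := by omega
        subst this; omega

theorem pvLast_max (l : List (Int × Nat × Nat)) (h : l ≠ []) (hpw : l.Pairwise pvLexLt) :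
    ∀ y ∈ l, y.1 ≤ (l.getLast h).1 := by
  induction l with
  | nil => simp at h
  | cons a t ih =>
    cases t with
    | nil => intro y hy; simp at hy; subst hy; simp [List.getLast]
    | cons b t' =>
      intro y hy
      rcases List.mem_cons.mp hy with rfl | hy'
      · have hmem : (b :: t').getLast (by simp) ∈ b :: t' := List.getLast_mem _
        have := (List.pairwise_cons.mp hpw).1 _ hmem
        have hlt : pvTupLt y ((b :: t').getLast (by simp)) = true := this
        rw [List.getLast_cons (by simp)]
        simp only [pvTupLt, Bool.or_eq_true, Bool.and_eq_true, decide_eq_true_eq, beq_iff_eq] at hlt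
        omega
      · rw [List.getLast_cons (by simp)]
        exact ih (by simp) (List.pairwise_cons.mp hpw).2 y hy'

-- A's first-argmin fold: characterisation
theorem pvArgmin_spec (ps : List Int) (hps : ps ≠ []) :
    let r := (List.range' 1 (ps.length - 1)).foldl
      (fun (p : Int × Nat) i => if ps.getD i 0 < p.1 then (ps.getD i 0, i) else p)
      (ps.getD 0 0, 0)
    r.2 < ps.length ∧ ps.getD r.2 0 = r.1 ∧ (∀ k, k < ps.length → r.1 ≤ ps.getD k 0) ∧
      (∀ k, k < r.2 → r.1 < ps.getD k 0) := by
  obtain ⟨h1, h2, h3, h4⟩ := pvArgmin_aux ps (ps.length - 1)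
  have hlen : 0 < ps.length := List.length_pos_of_ne_nil hps
  exact ⟨by omega, h2, fun k hk => h3 k (by omega), h4⟩

theorem pvCanon_set (pls : List (List Int)) (ptrs : List Nat) (mi v : Nat)
    (hlen : ptrs.length = pls.length) (hmi : mi < pls.length) :
    pvCanon pls (ptrs.set mi v) =
      (pvCanon pls ptrs).set mi ((pls.getD mi []).getD v 0, mi, v) := by
  apply List.ext_getElem
  · simp [pvCanon_length]
  · intro k h1 h2
    have hk : k < pls.length := by simpa [pvCanon_length] using h1
    rw [pvCanon_getElem pls _ k hk]
    by_cases hkm : k = mi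
    · subst hkm
      rw [List.getElem_set_self (by simpa [pvCanon_length] using hk)]
      rw [List.getD_eq_getElem (ptrs.set k v) 0 (by rw [List.length_set, hlen]; exact hk)]
      rw [List.getElem_set_self (by rw [List.length_set, hlen]; exact hk)]
    · rw [List.getElem_set_ne (by omega)]
      rw [pvCanon_getElem pls _ k hk]
      have : (ptrs.set mi v).getD k 0 = ptrs.getD k 0 := by
        by_cases hkl : k < ptrs.length
        · rw [List.getD_eq_getElem _ 0 (by simpa using hkl),
            List.getElem_set_ne (by omega), List.getD_eq_getElem _ 0 hkl]
        · rw [List.getD_eq_default _ 0 (by simpa using Nat.le_of_not_lt hkl),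
            List.getD_eq_default _ 0 (Nat.le_of_not_lt hkl)]
      rw [this]

theorem pvHead_facts (pls : List (List Int)) (ptrs : List Nat)
    (f : Int × Nat × Nat) (rest : List (Int × Nat × Nat))
    (hperm : (f :: rest).Perm (pvCanon pls ptrs))
    (hpw : (f :: rest).Pairwise pvLexLt) :
    f.2.1 < pls.length ∧
    f = ((pls.getD f.2.1 []).getD (ptrs.getD f.2.1 0) 0, f.2.1, ptrs.getD f.2.1 0) ∧
    (∀ y ∈ pvCanon pls ptrs, y = f ∨ pvLexLt f y) := by
  have hf : f ∈ pvCanon pls ptrs := hperm.subset (by simp)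
  obtain ⟨i, hi, hfi⟩ := List.mem_iff_getElem.mp hf
  have hi' : i < pls.length := by simpa [pvCanon_length] using hi
  rw [pvCanon_getElem pls ptrs i hi'] at hfi
  have hmid : f.2.1 = i := by rw [← hfi]
  refine ⟨by omega, by rw [hmid]; exact hfi.symm, ?_⟩
  intro y hy
  have hy' : y ∈ f :: rest := hperm.symm.subset hy
  rcases List.mem_cons.mp hy' with rfl | hy''
  · exact Or.inl rfl
  · exact Or.inr ((List.pairwise_cons.mp hpw).1 y hy'')

-- the main loop lemma: with related states, the two loops compute the same value for EVERY fuel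
theorem pvLoop_eq (fuel : Nat) (pls : List (List Int)) (ptrs : List Nat)
    (frontier : List (Int × Nat × Nat)) (best minSpan : Option Int)
    (hn : pls ≠ [])
    (hlen : ptrs.length = pls.length)
    (hbound : ∀ k, k < pls.length → ptrs.getD k 0 < (pls.getD k []).length)
    (hperm : frontier.Perm (pvCanon pls ptrs))
    (hpw : frontier.Pairwise pvLexLt)
    (hbest : best = minSpan) :
    pvBLoop pls fuel frontier best = pvALoop pls fuel ptrs minSpan := by
  induction fuel generalizing ptrs frontier best minSpan with
  | zero => simp [pvALoop, pvBLoop, hbest]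
  | succ fuel ih =>
    subst hbest
    have hn0 : 0 < pls.length := List.length_pos_of_ne_nil hn
    have hflen : frontier.length = pls.length := by
      simpa [pvCanon_length] using hperm.length_eq
    cases frontier with
    | nil => simp at hflen; omega
    | cons f rest =>
    obtain ⟨hmi_lt, hf, hmin_all⟩ := pvHead_facts pls ptrs f rest hperm hpw
    simp only [pvALoop, pvBLoop]
    set positions := List.map (fun i => (pls.getD i []).getD (ptrs.getD i 0) 0) (List.range pls.length) with hposdef
    have hposlen : positions.length = pls.length := by simp [hposdef]
    have hposne : positions ≠ [] := by
      intro h; rw [h] at hposlen; simp at hposlen; omega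
    have hposC : positions = (pvCanon pls ptrs).map (fun t => t.1) := by
      rw [hposdef]; simp [pvCanon, List.map_map, Function.comp_def]
    have hgetDpos : ∀ k, k < pls.length → positions.getD k 0 = (pls.getD k []).getD (ptrs.getD k 0) 0 := by
      intro k hk
      rw [hposdef, List.getD_eq_getElem _ _ (by simpa using hk)]
      simp
    have hfle : ∀ y ∈ pvCanon pls ptrs, f.1 ≤ y.1 := by
      intro y hy
      rcases hmin_all y hy with rfl | hlt
      · exact le_refl _
      · unfold pvLexLt at hlt; rw [pvTupLt_iff] at hlt; omega
    have hf1mem : f.1 ∈ positions := by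
      rw [hposC]; exact List.mem_map_of_mem (hperm.subset (by simp))
    have hminv : (PySem.List.min? positions (fun x => x)).getD 0 = f.1 := by
      rcases hmv : PySem.List.min? positions (fun x => x) with _ | m
      · exact absurd ((PySem.List.min?_eq_none_iff positions (fun x => x)).mp hmv) hposne
      · have hm_mem : m ∈ positions := PySem.List.min?_mem hmv
        have hm_min := PySem.List.min?_isMin hmv
        obtain ⟨y, hyC, hy1⟩ : ∃ y ∈ pvCanon pls ptrs, y.1 = m := by
          rw [hposC] at hm_mem
          obtain ⟨y, hyC, hy1⟩ := List.mem_map.mp hm_mem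
          exact ⟨y, hyC, hy1⟩
        have h1 := hfle y hyC
        have h2 := hm_min _ hf1mem
        simp only [Option.getD_some]
        omega
    have hlastmem : ((f :: rest).getLast (List.cons_ne_nil f rest)) ∈ f :: rest := List.getLast_mem _
    have hlastmax := pvLast_max (f :: rest) (List.cons_ne_nil f rest) hpw
    have hmaxv : (PySem.List.max? positions (fun x => x)).getD 0 = ((f :: rest).getLast (List.cons_ne_nil f rest)).1 := by
      rcases hmv : PySem.List.max? positions (fun x => x) with _ | m
      · exact absurd ((PySem.List.max?_eq_none_iff positions (fun x => x)).mp hmv) hposne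
      · have hm_mem : m ∈ positions := PySem.List.max?_mem hmv
        have hm_max := PySem.List.max?_isMax hmv
        have hlpos : ((f :: rest).getLast (List.cons_ne_nil f rest)).1 ∈ positions := by
          rw [hposC]; exact List.mem_map_of_mem (hperm.subset hlastmem)
        obtain ⟨y, hyF, hy1⟩ : ∃ y ∈ f :: rest, y.1 = m := by
          rw [hposC] at hm_mem
          obtain ⟨y, hyC, hy1⟩ := List.mem_map.mp hm_mem
          exact ⟨y, hperm.symm.subset hyC, hy1⟩
        have h1 := hlastmax y hyF
        have h2 := hm_max _ hlpos
        simp only [Option.getD_some]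
        omega
    obtain ⟨hr1, hr2, hr3, hr4⟩ := pvArgmin_spec positions hposne
    set r := (List.range' 1 (positions.length - 1)).foldl
      (fun (p : Int × Nat) i => if positions.getD i 0 < p.1 then (positions.getD i 0, i) else p)
      (positions.getD 0 0, 0) with hrdef
    have hr1' : r.2 < pls.length := by omega
    have hmival : positions.getD f.2.1 0 = f.1 := by
      rw [hgetDpos f.2.1 hmi_lt]
      have := congrArg Prod.fst hf
      simpa using this.symm
    have hCr2 : (pvCanon pls ptrs)[r.2]'(by rw [pvCanon_length]; exact hr1') =
        (positions.getD r.2 0, r.2, ptrs.getD r.2 0) := by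
      rw [pvCanon_getElem pls ptrs r.2 hr1', hgetDpos r.2 hr1']
    have hyC' : (positions.getD r.2 0, r.2, ptrs.getD r.2 0) ∈ pvCanon pls ptrs := by
      rw [← hCr2]; exact List.getElem_mem _
    have hr1f : r.1 = f.1 := by
      have h1 : r.1 ≤ f.1 := by rw [← hmival]; exact hr3 f.2.1 (by omega)
      have h2 : f.1 ≤ r.1 := by
        have hy := hfle _ hyC'
        simp only at hy
        rw [hr2] at hy
        exact hy
      omega
    have hr2f : r.2 = f.2.1 := by
      rcases Nat.lt_trichotomy r.2 f.2.1 with h | h | h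
      · exfalso
        rcases hmin_all _ hyC' with heq | hlt
        · have := congrArg (fun t => t.2.1) heq
          simp only at this
          omega
        · unfold pvLexLt at hlt
          rw [pvTupLt_iff] at hlt
          simp only at hlt
          rw [hr2, hr1f] at hlt
          omega
      · exact h
      · exfalso
        have := hr4 f.2.1 h
        rw [hmival] at this
        omega
    have hj : f.2.2 = ptrs.getD f.2.1 0 := by
      have := congrArg (fun t => t.2.2) hf; simpa using this
    -- spans and the running-minimum updates agree
    rw [hminv, hmaxv]
    have hbm : (match best with
        | none => ((f :: rest).getLast (List.cons_ne_nil f rest)).1 - f.1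
        | some b => if ((f :: rest).getLast (List.cons_ne_nil f rest)).1 - f.1 < b then
            ((f :: rest).getLast (List.cons_ne_nil f rest)).1 - f.1 else b) =
        (match best with
        | none => ((f :: rest).getLast (List.cons_ne_nil f rest)).1 - f.1
        | some m => min m (((f :: rest).getLast (List.cons_ne_nil f rest)).1 - f.1)) := by
      cases best with
      | none => rfl
      | some b => simp only [min_def]; split_ifs <;> omega
    rw [hbm, hr2f, ← hj]
    by_cases hz : (match best with
        | none => ((f :: rest).getLast (List.cons_ne_nil f rest)).1 - f.1
        | some m => min m (((f :: rest).getLast (List.cons_ne_nil f rest)).1 - f.1)) = 0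
    · rw [if_pos hz, if_pos hz]
    · rw [if_neg hz, if_neg hz]
      by_cases hdone : (pls.getD f.2.1 []).length ≤ f.2.2 + 1
      · rw [if_pos hdone, if_pos hdone]
      · rw [if_neg hdone, if_neg hdone]
        -- recursive case: re-establish the invariants
        have hfC : (pvCanon pls ptrs)[f.2.1]'(by rw [pvCanon_length]; exact hmi_lt) = f := by
          rw [pvCanon_getElem pls ptrs f.2.1 hmi_lt]; exact hf.symm
        have hrest : rest.Perm ((pvCanon pls ptrs).eraseIdx f.2.1) := by
          have h1 := (List.getElem_cons_eraseIdx_perm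
            (l := pvCanon pls ptrs) (n := f.2.1) (by rw [pvCanon_length]; exact hmi_lt)).symm
          rw [hfC] at h1
          exact (hperm.trans h1).cons_inv
        have hnodmid : (List.map (fun t => t.2.1) (f :: rest)).Nodup := by
          have hp := hperm.map (fun t => t.2.1)
          rw [pvCanon_map_mid] at hp
          exact hp.nodup_iff.mpr (List.nodup_range)
        have hmidne : ∀ y ∈ rest, y.2.1 ≠ f.2.1 := by
          intro y hy hc
          simp only [List.map_cons, List.nodup_cons] at hnodmid
          exact hnodmid.1 (hc ▸ List.mem_map_of_mem hy)
        refine ih (ptrs.set f.2.1 (f.2.2 + 1)) _ _ _ ?_ ?_ ?_ ?_ rfl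
        · rw [List.length_set]; exact hlen
        · intro k hk
          by_cases hkm : k = f.2.1
          · subst hkm
            rw [List.getD_eq_getElem _ 0 (by rw [List.length_set, hlen]; exact hk),
              List.getElem_set_self (by rw [List.length_set, hlen]; exact hk)]
            omega
          · have : (ptrs.set f.2.1 (f.2.2 + 1)).getD k 0 = ptrs.getD k 0 := by
              rw [List.getD_eq_getElem _ 0 (by rw [List.length_set, hlen]; exact hk),
                List.getElem_set_ne (by omega), List.getD_eq_getElem _ 0 (by rw [hlen]; exact hk)]
            rw [this]
            exact hbound k hk
        · -- frontier invariant
          rw [pvCanon_set pls ptrs f.2.1 (f.2.2 + 1) hlen hmi_lt]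
          have h2 : ((pvCanon pls ptrs).set f.2.1
              ((pls.getD f.2.1 []).getD (f.2.2 + 1) 0, f.2.1, f.2.2 + 1)).Perm
              (((pls.getD f.2.1 []).getD (f.2.2 + 1) 0, f.2.1, f.2.2 + 1) ::
                (pvCanon pls ptrs).eraseIdx f.2.1) := by
            have h2a := (List.getElem_cons_eraseIdx_perm
              (l := (pvCanon pls ptrs).set f.2.1 ((pls.getD f.2.1 []).getD (f.2.2 + 1) 0, f.2.1, f.2.2 + 1))
              (n := f.2.1) (by rw [List.length_set, pvCanon_length]; exact hmi_lt)).symm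
            rw [List.getElem_set_self (by rw [List.length_set, pvCanon_length]; exact hmi_lt)] at h2a
            rw [List.eraseIdx_set_eq] at h2a
            exact h2a
          exact ((pvInsort_perm _ rest).trans (hrest.cons _)).trans h2.symm
        · exact pvInsort_pairwise _ rest (List.pairwise_cons.mp hpw).2 hmidne

-- B's initial insort loop: permutation and sortedness, for any accumulator
theorem pvFoldlInsort_perm (l : List (List Int × Nat)) (acc : List (Int × Nat × Nat)) :
    (l.foldl (fun f p => pvInsort (p.1.getD 0 0, p.2, 0) f) acc).Perm
      (acc ++ l.map (fun p => (p.1.getD 0 0, p.2, 0))) := by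
  induction l generalizing acc with
  | nil => simp
  | cons x xs ih =>
    simp only [List.foldl_cons, List.map_cons]
    refine (ih _).trans ?_
    refine (((pvInsort_perm _ acc).append_right _).trans ?_)
    exact List.perm_middle.symm.symm.symm

theorem pvFoldlInsort_pairwise (l : List (List Int × Nat)) (acc : List (Int × Nat × Nat))
    (hacc : acc.Pairwise pvLexLt)
    (hd : ∀ y ∈ acc, ∀ p ∈ l, y.2.1 ≠ p.2)
    (hnd : (l.map Prod.snd).Nodup) :
    (l.foldl (fun f p => pvInsort (p.1.getD 0 0, p.2, 0) f) acc).Pairwise pvLexLt := by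
  induction l generalizing acc with
  | nil => simpa
  | cons x xs ih =>
    simp only [List.foldl_cons]
    simp only [List.map_cons, List.nodup_cons] at hnd
    refine ih _ (pvInsort_pairwise _ _ hacc (fun y hy => hd y hy x (by simp))) ?_ hnd.2
    intro y hy p hp
    have hy' : y = (x.1.getD 0 0, x.2, 0) ∨ y ∈ acc := by
      have := (pvInsort_perm _ acc).mem_iff.mp hy
      simpa using this
    rcases hy' with rfl | hy'
    · intro hcon
      refine hnd.1 ?_
      have : p.2 ∈ xs.map Prod.snd := List.mem_map_of_mem hp
      simpa [← hcon] using this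
    · exact hd y hy' p (by simp [hp])

-- the initial frontier built by B's insort loop
theorem pvInit_frontier (pls : List (List Int)) :
    let fr := pls.zipIdx.foldl (fun f p => pvInsort (p.1.getD 0 0, p.2, 0) f) []
    fr.Perm (pvCanon pls (List.replicate pls.length 0)) ∧ fr.Pairwise pvLexLt := by
  have hmap : pls.zipIdx.map (fun p => (p.1.getD 0 0, p.2, 0)) =
      pvCanon pls (List.replicate pls.length 0) := by
    apply List.ext_getElem
    · simp [pvCanon]
    · intro k h1 h2
      have hk : k < pls.length := by simpa using h1
      rw [pvCanon_getElem pls _ k hk]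
      rw [List.getD_eq_getElem pls [] hk]
      simp [List.getElem_zipIdx]
  constructor
  · have h := pvFoldlInsort_perm pls.zipIdx []
    rw [List.nil_append] at h
    exact hmap ▸ h
  · refine pvFoldlInsort_pairwise _ _ (by simp) (by simp) ?_
    have : pls.zipIdx.map Prod.snd = List.range pls.length := by
      simp [List.range_eq_range']
    simp [this, List.nodup_range]

-- ===== VERDICT (by name: the statement is the Claim_ definition above) =====
theorem min_window_span_spec : Claim_equal_min_window_span := by
  intro pls _
  unfold Spec_min_window_span min_window_span min_window_span_alt
  by_cases hg : pls = [] ∨ (pls.any fun pl => decide (pl = [])) = true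
  · rw [if_pos hg, if_pos hg]
  · rw [if_neg hg, if_neg hg]
    have hne : pls ≠ [] := fun h => hg (Or.inl h)
    have hall' : ∀ pl ∈ pls, pl ≠ [] := by
      intro pl hpl hplnil
      exact hg (Or.inr (List.any_eq_true.mpr ⟨pl, hpl, by simp [hplnil]⟩))
    obtain ⟨hperm, hpw⟩ := pvInit_frontier pls
    exact ((pvLoop_eq (pvFuel pls) pls (List.replicate pls.length 0) _ none none hne
      (by simp)
      (by
        intro k hk
        have hmem : pls[k]'hk ∈ pls := List.getElem_mem hk
        have h := hall' _ hmem
        have hg' : pls.getD k [] = pls[k]'hk := List.getD_eq_getElem pls [] hk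
        rw [hg']
        have hlen : 0 < (pls[k]'hk).length := List.length_pos_of_ne_nil h
        have hre : (List.replicate pls.length 0 : List Nat).getD k 0 = 0 := by
          simp
        omega)
      hperm hpw rfl).symm)
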